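-- pv_equiv track=rewrite | github.com/jaysj0226/Algorithm | 251227/Median Calculation 2/get-median-2.py | read_array
-- ===== SOURCE A (Python) =====
-- def read_array(arr):
--     sub_arr = []
--     res_arr = []
--     for i in range(len(arr)):
--         sub_arr.append(arr[i])
--         if (i+1) % 2:
--             sub_arr = sorted(sub_arr)
--             res_arr.append(sub_arr[i//2])
--
--     return res_arr
-- ===== SOURCE B (Python) =====
-- def read_array(arr):
--     # Maintain the prefix in sorted order by inserting each new element in place,
--     # instead of re-sorting the whole prefix at every odd step.
--     s = []
--     res = []
--     take_median = True
--     for x in arr: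
--         i = 0
--         while i < len(s) and s[i] <= x:
--             i += 1
--         s.insert(i, x)
--         if take_median:
--             res.append(s[len(s) // 2])
--         take_median = not take_median
--     return res
-- ===== Notes on version B (the rewrite author's own statement) =====
-- stated objective: alternative
-- what changed: B keeps the prefix permanently sorted by a single in-place insertion per element (incremental insertion, one pass) instead of A's re-sorting the whole prefix at every odd index.
import Mathlib
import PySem

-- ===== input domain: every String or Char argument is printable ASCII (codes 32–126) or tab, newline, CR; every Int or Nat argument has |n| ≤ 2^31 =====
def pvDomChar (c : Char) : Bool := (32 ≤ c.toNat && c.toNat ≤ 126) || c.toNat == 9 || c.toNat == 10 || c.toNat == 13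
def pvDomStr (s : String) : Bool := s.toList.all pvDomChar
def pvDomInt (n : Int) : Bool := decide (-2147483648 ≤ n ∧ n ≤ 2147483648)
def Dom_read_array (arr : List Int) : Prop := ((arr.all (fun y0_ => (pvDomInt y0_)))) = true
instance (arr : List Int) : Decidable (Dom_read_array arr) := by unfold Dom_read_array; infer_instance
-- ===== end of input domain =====

-- B replaces A's full re-sort of the prefix at every odd index by keeping the prefix
-- permanently sorted via one in-place insertion per element (alternative algorithm, same results).


-- ===== PORT A =====
-- 'for i in range(len(arr)): sub_arr.append(arr[i]) …' ported as structural recursion over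
-- the elements with the index i carried along (arr[i] is exactly the current element, in range).
def readLoopA : List Int → Nat → List Int → List Int → List Int
  | [], _, _, res => res
  | x :: rest, i, sub, res =>
    let sub1 := sub ++ [x]
    if PySem.Int.mod ((i : Int) + 1) 2 ≠ 0 then
      let sub2 := PySem.List.sorted sub1 (fun v => v) false
      readLoopA rest (i + 1) sub2
        (res ++ [PySem.List.pyGetD sub2 (PySem.Int.floordiv (i : Int) 2) 0])
    else
      readLoopA rest (i + 1) sub1 res

def read_array (arr : List Int) : List Int := readLoopA arr 0 [] []

-- ===== PORT B =====
-- Source B's 'while i < len(s) and s[i] <= x: i += 1; s.insert(i, x)' — insertion after all ≤ x.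
def insertSorted : List Int → Int → List Int
  | [], x => [x]
  | h :: t, x => if h ≤ x then h :: insertSorted t x else x :: h :: t

def readLoopB : List Int → Bool → List Int → List Int → List Int
  | [], _, _, res => res
  | x :: rest, flag, s, res =>
    let s1 := insertSorted s x
    let res1 :=
      if flag then
        res ++ [PySem.List.pyGetD s1 (PySem.Int.floordiv ((s1.length : Int)) 2) 0]
      else res
    readLoopB rest (!flag) s1 res1

def read_array_alt (arr : List Int) : List Int := readLoopB arr true [] []

-- ===== PRECONDITION & SPEC =====
def Spec_read_array (arr : List Int) (out : List Int) : Prop := out = read_array_alt arr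
instance (arr : List Int) (out : List Int) : Decidable (Spec_read_array arr out) := by unfold Spec_read_array; infer_instance

-- ===== CLAIM (what is proved, stated in full; the proofs are below) =====
def Claim_equal_read_array : Prop := ∀ (arr : List Int), Dom_read_array arr → Spec_read_array arr (read_array arr)

-- ===== LEMMAS AND PROOFS =====

lemma insertSorted_perm (s : List Int) (x : Int) : (insertSorted s x).Perm (x :: s) := by
  induction s with
  | nil => simp [insertSorted]
  | cons h t ih =>
    simp only [insertSorted]
    split
    · exact ((ih.cons h).trans (List.Perm.swap x h t))
    · exact List.Perm.refl _

lemma mem_insertSorted {s : List Int} {x y : Int} (hy : y ∈ insertSorted s x) :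
    y = x ∨ y ∈ s := by
  have := (insertSorted_perm s x).mem_iff.mp hy
  simp at this; exact this

lemma insertSorted_pairwise {s : List Int} (hs : s.Pairwise (· ≤ ·)) (x : Int) :
    (insertSorted s x).Pairwise (· ≤ ·) := by
  induction s with
  | nil => simp [insertSorted]
  | cons h t ih =>
    rcases List.pairwise_cons.mp hs with ⟨hh, ht⟩
    simp only [insertSorted]
    split
    · rename_i hle
      refine List.pairwise_cons.mpr ⟨?_, ih ht⟩
      intro y hy
      rcases mem_insertSorted hy with rfl | hy
      · exact hle
      · exact hh y hy
    · rename_i hgt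
      rw [not_le] at hgt
      refine List.pairwise_cons.mpr ⟨?_, hs⟩
      intro y hy
      rcases List.mem_cons.mp hy with rfl | hy
      · exact le_of_lt hgt
      · exact le_trans (le_of_lt hgt) (hh y hy)

lemma insertSorted_length (s : List Int) (x : Int) :
    (insertSorted s x).length = s.length + 1 := by
  simpa using (insertSorted_perm s x).length_eq

lemma loop_eq : ∀ (l : List Int) (i : Nat) (sub s res : List Int),
    sub.Perm s → s.Pairwise (· ≤ ·) → sub.length = i →
    readLoopA l i sub res = readLoopB l (decide (i % 2 = 0)) s res := by
  intro l
  induction l with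
  | nil => intro i sub s res _ _ _; simp [readLoopA, readLoopB]
  | cons x rest ih =>
    intro i sub s res hperm hsorted hlen
    have hlenB : s.length = i := by rw [← hperm.length_eq, hlen]
    have hmod : PySem.Int.mod ((i : Int) + 1) 2 = (((i + 1) % 2 : Nat) : Int) := by
      have h := PySem.Int.mod_natCast (i + 1) 2
      have hc : ((i + 1 : Nat) : Int) = (i : Int) + 1 := by push_cast; ring
      rw [hc] at h
      exact h
    have hpermx : (sub ++ [x]).Perm (insertSorted s x) :=
      (List.perm_append_singleton x sub).trans
        ((hperm.cons x).trans (insertSorted_perm s x).symm)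
    have hsorted' : (insertSorted s x).Pairwise (· ≤ ·) := insertSorted_pairwise hsorted x
    by_cases hi : i % 2 = 0
    · -- median step: (i+1) % 2 = 1 ≠ 0
      have hcond : PySem.Int.mod ((i : Int) + 1) 2 ≠ 0 := by
        rw [hmod]; omega
      have hsubeq : PySem.List.sorted (sub ++ [x]) (fun v => v) false = insertSorted s x :=
        PySem.List.sorted_id_eq_of_perm_of_pairwise (sub ++ [x]) (insertSorted s x) hpermx.symm hsorted'
      have hidx : PySem.Int.floordiv ((i : Int)) 2
          = PySem.Int.floordiv (((insertSorted s x).length : Int)) 2 := by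
        rw [insertSorted_length, hlenB]
        have h1 : PySem.Int.floordiv ((i : Int)) 2 = ((i / 2 : Nat) : Int) := by
          exact_mod_cast PySem.Int.floordiv_natCast i 2
        have h2 : PySem.Int.floordiv (((i + 1 : Nat) : Int)) 2 = (((i + 1) / 2 : Nat) : Int) := by
          exact_mod_cast PySem.Int.floordiv_natCast (i + 1) 2
        rw [h1, h2]
        omega
      simp only [readLoopA, readLoopB, hi, decide_true, if_pos hcond, if_true, hsubeq, hidx]
      rw [ih (i + 1) (insertSorted s x) (insertSorted s x)
            (res ++ [PySem.List.pyGetD (insertSorted s x)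
              (PySem.Int.floordiv (((insertSorted s x).length : Int)) 2) 0])
            (List.Perm.refl _) hsorted'
            (by rw [insertSorted_length, hlenB])]
      congr 1
      simp
      omega
    · -- no median: (i+1) % 2 = 0
      have hcond : ¬ PySem.Int.mod ((i : Int) + 1) 2 ≠ 0 := by
        rw [hmod]; omega
      have hflag : decide (i % 2 = 0) = false := by simp [hi]
      simp only [readLoopA, readLoopB, hflag, if_neg hcond, Bool.false_eq_true, if_false]
      rw [ih (i + 1) (sub ++ [x]) (insertSorted s x) res hpermx hsorted'
            (by simp [hlen])]
      congr 1
      simp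
      omega

-- ===== VERDICT (by name: the statement is the Claim_ definition above) =====
theorem read_array_spec : Claim_equal_read_array := by
  intro arr _
  unfold Spec_read_array read_array read_array_alt
  have := loop_eq arr 0 [] [] [] (List.Perm.refl _) (by simp) rfl
  simpa using this
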